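-- pv_equiv track=rewrite | github.com/cc-arunkumar/ust_python_training | deva_prasath/day_10/assessment/utils.py | generate_id
-- ===== SOURCE A (Python) =====
-- def generate_id(prefix: str, existing_ids: set) -> str:
--     """Generate unique ID with prefix (e.g., T1, B1001)."""
--     if not prefix:
--         raise ValueError("Prefix cannot be empty")
--     i = 1
--     while True:
--         new_id = f"{prefix}{i}"
--         if new_id not in existing_ids:
--             return new_id
--         i += 1
-- ===== SOURCE B (Python) =====
-- def generate_id(prefix: str, existing_ids: set) -> str:
--     """Generate unique ID with prefix (e.g., T1, B1001)."""
--     if not prefix: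
--         raise ValueError("Prefix cannot be empty")
--     # The answer is among the first len(existing_ids)+1 candidate indices
--     # (pigeonhole), so index them all up front, collect which are occupied in
--     # ONE pass over existing_ids, and find the first gap in the sorted indices.
--     k = len(prefix)
--     index = {str(i): i for i in range(1, len(existing_ids) + 2)}
--     taken = sorted({index[s[k:]] for s in existing_ids
--                     if s.startswith(prefix) and s[k:] in index})
--     i = 1
--     for v in taken:
--         if v == i:
--             i += 1
--         elif v > i:
--             break
--     return f"{prefix}{i}"
-- ===== Notes on version B (the rewrite author's own statement) =====
-- stated objective: alternative
-- what changed: Instead of probing candidate ids one by one, B precomputes a dict indexing the len(existing_ids)+1 candidates that can possibly be the answer (pigeonhole bound), collects the occupied indices in a single pass over existing_ids, and returns the first gap found by scanning the sorted occupied indices.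
-- outside the precondition, e.g. on generate_id('', set()): A raises ValueError, B raises ValueError
import Mathlib
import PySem

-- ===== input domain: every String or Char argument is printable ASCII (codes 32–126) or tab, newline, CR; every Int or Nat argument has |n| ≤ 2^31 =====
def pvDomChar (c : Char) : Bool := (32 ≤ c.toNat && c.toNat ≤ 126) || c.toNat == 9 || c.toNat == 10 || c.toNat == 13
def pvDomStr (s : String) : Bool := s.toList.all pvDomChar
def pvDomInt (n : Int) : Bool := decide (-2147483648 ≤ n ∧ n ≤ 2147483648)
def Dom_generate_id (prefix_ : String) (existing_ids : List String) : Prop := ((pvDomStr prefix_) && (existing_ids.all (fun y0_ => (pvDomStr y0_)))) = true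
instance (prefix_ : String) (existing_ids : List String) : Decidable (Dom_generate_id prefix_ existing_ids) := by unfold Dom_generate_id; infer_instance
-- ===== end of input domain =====

-- B replaces A's open-ended probing of candidate ids by: a dict indexing the
-- len(existing_ids)+1 candidates the answer can be (pigeonhole bound), one pass over
-- existing_ids collecting the occupied indices, and a first-gap scan of the sorted
-- occupied indices (objective: alternative; same results, different algorithm).


-- ===== PORT A =====
-- 'while True: new_id = f"{prefix}{i}"; if new_id not in existing_ids: return new_id; i += 1'
-- fueled with existing_ids.length + 1 steps: the candidates are pairwise distinct strings,
-- so within length+1 attempts one is missing and Python's loop has returned.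
def genLoopA (prefix_ : String) (existing_ids : List String) : Nat → Int → String
  | 0, i => prefix_ ++ PySem.Int.toStr i
  | fuel + 1, i =>
    let new_id := prefix_ ++ PySem.Int.toStr i
    if !(existing_ids.contains new_id) then new_id
    else genLoopA prefix_ existing_ids fuel (i + 1)

def generate_id (prefix_ : String) (existing_ids : List String) : String :=
  if prefix_ == "" then ""   -- Python: raise ValueError("Prefix cannot be empty") — outside Pre_
  else genLoopA prefix_ existing_ids (existing_ids.length + 1) 1

-- ===== PORT B =====
-- 'for v in taken: if v == i: i += 1; elif v > i: break' as structural recursion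
def gapScan : List Int → Int → Int
  | [], i => i
  | v :: rest, i =>
    if v == i then gapScan rest (i + 1)
    else if i < v then i
    else gapScan rest i

def generate_id_alt (prefix_ : String) (existing_ids : List String) : String :=
  if prefix_ == "" then ""   -- Python: raise ValueError("Prefix cannot be empty") — outside Pre_
  else
    -- k = len(prefix); index = {str(i): i for i in range(1, len(existing_ids) + 2)}
    let k := PySem.Str.len prefix_
    let index : PySem.Dict String Int :=
      (PySem.List.pyRange 1 (existing_ids.length + 2) 1).foldl
        (fun d i => d.insert (PySem.Int.toStr i) i) PySem.Dict.empty
    -- taken = sorted({index[s[k:]] for s in existing_ids if s.startswith(prefix) and s[k:] in index})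
    let takenSet : PySem.Set Int :=
      existing_ids.foldl
        (fun u s => if PySem.Str.startswith s prefix_
              && index.contains (PySem.Str.slice s (some k) none)
            then PySem.Set.add u ((index.get? (PySem.Str.slice s (some k) none)).getD 0) else u)
        PySem.Set.empty
    let taken := PySem.List.sorted takenSet (fun x => x)
    prefix_ ++ PySem.Int.toStr (gapScan taken 1)

-- ===== PRECONDITION & SPEC =====
-- Pre_ excludes only the empty prefix, on which Python A raises ValueError.
def Pre_generate_id (prefix_ : String) (existing_ids : List String) : Prop := prefix_ ≠ ""
instance (prefix_ : String) (existing_ids : List String) : Decidable (Pre_generate_id prefix_ existing_ids) := by unfold Pre_generate_id; infer_instance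
def pvWitness_generate_id : String × List String := ("T", ["T1", "T2", "B5"])

def Spec_generate_id (prefix_ : String) (existing_ids : List String) (out : String) : Prop := out = generate_id_alt prefix_ existing_ids
instance (prefix_ : String) (existing_ids : List String) (out : String) : Decidable (Spec_generate_id prefix_ existing_ids out) := by unfold Spec_generate_id; infer_instance

-- ===== CLAIM (what is proved, stated in full; the proofs are below) =====
def Claim_equal_generate_id : Prop := ∀ (prefix_ : String) (existing_ids : List String), Dom_generate_id prefix_ existing_ids → Pre_generate_id prefix_ existing_ids → Spec_generate_id prefix_ existing_ids (generate_id prefix_ existing_ids)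

-- ===== LEMMAS AND PROOFS =====

-- value of a decimal digit string (proof-side only)
def digitsVal (cs : List Char) : Nat := cs.foldl (fun a c => 10 * a + (c.toNat - 48)) 0

theorem digitsVal_append_singleton (xs : List Char) (c : Char) :
    digitsVal (xs ++ [c]) = 10 * digitsVal xs + (c.toNat - 48) := by
  simp [digitsVal, List.foldl_append]

theorem digitChar_val (d : Nat) (hd : d < 10) : (Nat.digitChar d).toNat - 48 = d := by
  interval_cases d <;> rfl

theorem digitsVal_toDigits (n : Nat) : digitsVal (Nat.toDigits 10 n) = n := by
  induction n using Nat.strong_induction_on with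
  | _ n ih =>
    rw [Nat.toDigits_eq_if (by norm_num)]
    by_cases h : n < 10
    · simp [h, digitsVal, digitChar_val n h]
    · rw [if_neg h, digitsVal_append_singleton,
        ih (n / 10) (by omega), digitChar_val (n % 10) (by omega)]
      omega

-- str is injective on positive integers
theorem toStr_inj_pos (i j : Int) (hi : 1 ≤ i) (hj : 1 ≤ j)
    (h : PySem.Int.toStr i = PySem.Int.toStr j) : i = j := by
  have h' : PySem.Int.toChars i = PySem.Int.toChars j := by
    rw [← PySem.Int.toList_toStr, ← PySem.Int.toList_toStr, h]
  unfold PySem.Int.toChars at h'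
  rw [if_neg (by omega), if_neg (by omega)] at h'
  have := congrArg digitsVal h'
  rw [digitsVal_toDigits, digitsVal_toDigits] at this
  omega

theorem cand_inj_pos (p : String) (i j : Int) (hi : 1 ≤ i) (hj : 1 ≤ j)
    (h : p ++ PySem.Int.toStr i = p ++ PySem.Int.toStr j) : i = j := by
  apply toStr_inj_pos i j hi hj
  apply String.toList_inj.mp
  have := congrArg String.toList h
  rw [String.toList_append, String.toList_append] at this
  exact List.append_cancel_left this

-- membership / nodup of the conditional-add fold that builds the taken set
theorem mem_condAdd_fold {α β : Type} [BEq β] [LawfulBEq β] (f : α → Bool) (g : α → β) :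
    ∀ (l : List α) (u : PySem.Set β) (m : β),
      m ∈ l.foldl (fun u s => if f s then PySem.Set.add u (g s) else u) u
        ↔ m ∈ u ∨ ∃ s ∈ l, f s = true ∧ g s = m := by
  intro l
  induction l with
  | nil => simp
  | cons s rest ih =>
    intro u m
    simp only [List.foldl_cons, List.mem_cons]
    by_cases hs : f s
    · rw [if_pos hs, ih]
      rw [PySem.Set.mem_add]
      constructor
      · rintro (⟨hu | hu⟩ | ⟨x, hx, h1, h2⟩)
        · exact Or.inl hu
        · exact Or.inr ⟨s, Or.inl rfl, hs, hu.symm⟩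
        · exact Or.inr ⟨x, Or.inr hx, h1, h2⟩
      · rintro (hu | ⟨x, rfl | hx, h1, h2⟩)
        · exact Or.inl (Or.inl hu)
        · exact Or.inl (Or.inr h2.symm)
        · exact Or.inr ⟨x, hx, h1, h2⟩
    · rw [if_neg hs, ih]
      constructor
      · rintro (hu | ⟨x, hx, h1, h2⟩)
        · exact Or.inl hu
        · exact Or.inr ⟨x, Or.inr hx, h1, h2⟩
      · rintro (hu | ⟨x, rfl | hx, h1, h2⟩)
        · exact Or.inl hu
        · exact absurd h1 (by simpa using hs)
        · exact Or.inr ⟨x, hx, h1, h2⟩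

theorem nodup_condAdd_fold {α β : Type} [BEq β] [LawfulBEq β] (f : α → Bool) (g : α → β) :
    ∀ (l : List α) (u : PySem.Set β), u.Nodup →
      (l.foldl (fun u s => if f s then PySem.Set.add u (g s) else u) u).Nodup := by
  intro l
  induction l with
  | nil => intro u hu; simpa
  | cons s rest ih =>
    intro u hu
    simp only [List.foldl_cons]
    by_cases hs : f s
    · rw [if_pos hs]; exact ih _ (PySem.Set.nodup_add _ _ hu)
    · rw [if_neg hs]; exact ih _ hu

-- s = p ++ r  ⟺  s starts with p and s[len(p):] = r
theorem eq_append_iff_startswith_slice (p s r : String) :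
    s = p ++ r ↔ (PySem.Str.startswith s p = true ∧ PySem.Str.slice s (some (PySem.Str.len p)) none = r) := by
  constructor
  · rintro rfl
    constructor
    · simp [PySem.Chars.startswith_iff]
    · apply String.toList_inj.mp
      simp [PySem.Str.toList_slice, PySem.Str.len_eq, PySem.Chars.slice_eq_listSlice,
            PySem.List.slice_from_natCast]
  · rintro ⟨h1, h2⟩
    rw [PySem.Str.startswith_eq, PySem.Chars.startswith_iff] at h1
    obtain ⟨t, ht⟩ := h1
    have h2' : s.toList.drop p.toList.length = r.toList := by
      rw [← h2]
      simp [PySem.Str.toList_slice, PySem.Str.len_eq, PySem.Chars.slice_eq_listSlice,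
            PySem.List.slice_from_natCast]
    rw [← ht, List.drop_left] at h2'
    apply String.toList_inj.mp
    rw [String.toList_append, ← ht, h2']

-- the candidate-index dict: lookup characterisation
theorem index_get? (n : Nat) (r : String) (v : Int) :
    (((PySem.List.pyRange 1 ((n : Int) + 2) 1).foldl
        (fun d i => d.insert (PySem.Int.toStr i) i) PySem.Dict.empty).get? r = some v)
      ↔ (1 ≤ v ∧ v < (n : Int) + 2 ∧ r = PySem.Int.toStr v) := by
  have hmapnd : ((PySem.List.pyRange 1 ((n : Int) + 2) 1).map PySem.Int.toStr).Nodup := by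
    apply List.Nodup.map_on
    · intro x hx y hy hxy
      rw [PySem.List.mem_pyRange_one] at hx hy
      exact toStr_inj_pos x y hx.1 hy.1 hxy
    · exact PySem.List.nodup_pyRange_one 1 ((n : Int) + 2)
  have hitems : ((PySem.List.pyRange 1 ((n : Int) + 2) 1).foldl
      (fun d i => d.insert (PySem.Int.toStr i) i) PySem.Dict.empty).items
      = (PySem.List.pyRange 1 ((n : Int) + 2) 1).map (fun i => (PySem.Int.toStr i, i)) := by
    rw [PySem.Dict.items_foldl_insert_fresh _ _ _ _ (fun a _ => PySem.Dict.contains_empty _) hmapnd]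
    rfl
  have hkeysnd : ((PySem.List.pyRange 1 ((n : Int) + 2) 1).foldl
      (fun d i => d.insert (PySem.Int.toStr i) i) PySem.Dict.empty).keys.Nodup := by
    simp only [PySem.Dict.keys, hitems, List.map_map]
    exact hmapnd
  rw [PySem.Dict.get?_eq_some_iff_mem_items _ _ _ hkeysnd, hitems, List.mem_map]
  constructor
  · rintro ⟨i, hi, heq⟩
    rw [PySem.List.mem_pyRange_one] at hi
    injection heq with h1 h2
    subst h2
    exact ⟨hi.1, hi.2, h1.symm⟩
  · rintro ⟨h1, h2, rfl⟩
    exact ⟨v, PySem.List.mem_pyRange_one.mpr ⟨h1, h2⟩, rfl⟩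

-- membership in the taken set
theorem mem_taken (p : String) (ids : List String) (m : Int) :
    (m ∈ ids.foldl
        (fun u s => if PySem.Str.startswith s p
              && (((PySem.List.pyRange 1 ((ids.length : Int) + 2) 1).foldl
                (fun d i => d.insert (PySem.Int.toStr i) i) PySem.Dict.empty).contains
                  (PySem.Str.slice s (some (PySem.Str.len p)) none))
            then PySem.Set.add u ((((PySem.List.pyRange 1 ((ids.length : Int) + 2) 1).foldl
              (fun d i => d.insert (PySem.Int.toStr i) i) PySem.Dict.empty).get?
                (PySem.Str.slice s (some (PySem.Str.len p)) none)).getD 0)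
            else u)
        PySem.Set.empty)
      ↔ (1 ≤ m ∧ m < (ids.length : Int) + 2 ∧ (p ++ PySem.Int.toStr m) ∈ ids) := by
  rw [mem_condAdd_fold]
  constructor
  · rintro (hu | ⟨s, hs, hc, hg⟩)
    · cases hu
    · obtain ⟨hsw, hc⟩ := Bool.and_eq_true_iff.mp hc
      rw [PySem.Dict.contains_eq_isSome_get?] at hc
      obtain ⟨v, hv⟩ := Option.isSome_iff_exists.mp hc
      rw [hv] at hg
      simp only [Option.getD_some] at hg
      subst hg
      obtain ⟨h1, h2, hslice⟩ := (index_get? ids.length _ _).mp hv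
      have hs' : s = p ++ PySem.Int.toStr v :=
        (eq_append_iff_startswith_slice p s (PySem.Int.toStr v)).mpr ⟨hsw, hslice⟩
      exact ⟨h1, h2, hs' ▸ hs⟩
  · rintro ⟨h1, h2, hmem⟩
    obtain ⟨hsw, hslice⟩ :=
      (eq_append_iff_startswith_slice p (p ++ PySem.Int.toStr m) (PySem.Int.toStr m)).mp rfl
    refine Or.inr ⟨p ++ PySem.Int.toStr m, hmem, ?_, ?_⟩
    · rw [hsw, hslice, Bool.true_and, PySem.Dict.contains_eq_isSome_get?,
        ((index_get? ids.length _ m).mpr ⟨h1, h2, rfl⟩ : _ = some m)]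
      rfl
    · rw [hslice, ((index_get? ids.length _ m).mpr ⟨h1, h2, rfl⟩ : _ = some m)]
      rfl

-- first-gap scan on a strictly increasing list returns the least value ≥ i missing from it
theorem gapScan_spec : ∀ (l : List Int), l.Pairwise (· < ·) → ∀ (i : Int),
    i ≤ gapScan l i ∧ gapScan l i ∉ l ∧ ∀ x, i ≤ x → x < gapScan l i → x ∈ l := by
  intro l
  induction l with
  | nil => intro _ i; exact ⟨le_refl i, by simp [gapScan], fun x h1 h2 => by simp [gapScan] at h2; omega⟩
  | cons v rest ih =>
    intro hpw i
    have hrest := List.Pairwise.of_cons hpw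
    have hvlt : ∀ y ∈ rest, v < y := fun y hy => (List.pairwise_cons.mp hpw).1 y hy
    simp only [gapScan]
    by_cases hvi : v = i
    · rw [if_pos (by simpa using hvi)]
      obtain ⟨h1, h2, h3⟩ := ih hrest (i + 1)
      refine ⟨by omega, ?_, ?_⟩
      · intro hmem
        rcases List.mem_cons.mp hmem with h | h
        · subst hvi; omega
        · exact h2 h
      · intro x hx1 hx2
        by_cases hxe : x = i
        · subst hxe hvi; exact List.mem_cons_self
        · exact List.mem_cons_of_mem _ (h3 x (by omega) hx2)
    · rw [if_neg (by simpa using hvi)]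
      by_cases hlt : i < v
      · rw [if_pos hlt]
        refine ⟨le_refl i, ?_, fun x h1 h2 => by omega⟩
        intro hmem
        rcases List.mem_cons.mp hmem with h | h
        · omega
        · have := hvlt _ h; omega
      · rw [if_neg hlt]
        have hvi' : v < i := by omega
        obtain ⟨h1, h2, h3⟩ := ih hrest i
        refine ⟨h1, ?_, ?_⟩
        · intro hmem
          rcases List.mem_cons.mp hmem with h | h
          · omega
          · exact h2 h
        · intro x hx1 hx2
          exact List.mem_cons_of_mem _ (h3 x hx1 hx2)

-- A's fueled loop returns the first free candidate, provided one exists within the fuel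
theorem loopA_spec (p : String) (ids : List String) :
    ∀ (fuel : Nat) (i0 : Int),
      (∃ j : Nat, j ≤ fuel ∧ (p ++ PySem.Int.toStr (i0 + j)) ∉ ids) →
      ∃ m : Int, genLoopA p ids fuel i0 = p ++ PySem.Int.toStr m ∧ i0 ≤ m ∧
        (p ++ PySem.Int.toStr m) ∉ ids ∧ ∀ x, i0 ≤ x → x < m → (p ++ PySem.Int.toStr x) ∈ ids := by
  intro fuel
  induction fuel with
  | zero =>
    rintro i0 ⟨j, hj, hnot⟩
    have hj0 : j = 0 := by omega
    subst hj0
    simp only [Nat.cast_zero, add_zero] at hnot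
    exact ⟨i0, rfl, le_refl i0, hnot, fun x h1 h2 => by omega⟩
  | succ fuel ih =>
    rintro i0 ⟨j, hj, hnot⟩
    simp only [genLoopA]
    by_cases hmem : (p ++ PySem.Int.toStr i0) ∈ ids
    · rw [if_neg (by simp [hmem])]
      have hj0 : j ≠ 0 := by rintro rfl; simp at hnot; exact hnot hmem
      obtain ⟨m, heq, h1, h2, h3⟩ := ih (i0 + 1)
        ⟨j - 1, by omega, by
          have : i0 + 1 + ((j - 1 : Nat) : Int) = i0 + (j : Int) := by
            have : (1 : Int) ≤ (j : Int) := by exact_mod_cast Nat.one_le_iff_ne_zero.mpr hj0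
            push_cast [Nat.cast_sub (Nat.one_le_iff_ne_zero.mpr hj0)]
            ring
          rw [this]; exact hnot⟩
      refine ⟨m, heq, by omega, h2, ?_⟩
      intro x hx1 hx2
      by_cases hxe : x = i0
      · subst hxe; exact hmem
      · exact h3 x (by omega) hx2
    · rw [if_pos (by simp [hmem])]
      exact ⟨i0, rfl, le_refl i0, hmem, fun x h1 h2 => by omega⟩

-- pigeonhole: among the first length+1 candidates one is missing from the list
theorem exists_free (p : String) (ids : List String) :
    ∃ j : Nat, j ≤ ids.length ∧ (p ++ PySem.Int.toStr (1 + (j : Int))) ∉ ids := by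
  by_contra hall
  push Not at hall
  have hsub : ∀ c ∈ (List.range (ids.length + 1)).map
      (fun j : Nat => p ++ PySem.Int.toStr (1 + (j : Int))), c ∈ ids := by
    intro c hc
    obtain ⟨j, hj, rfl⟩ := List.mem_map.mp hc
    exact hall j (by simpa using Nat.lt_succ_iff.mp (List.mem_range.mp hj))
  have hnd : ((List.range (ids.length + 1)).map
      (fun j : Nat => p ++ PySem.Int.toStr (1 + (j : Int)))).Nodup := by
    apply List.Nodup.map_on
    · intro x hx y hy hxy
      have := cand_inj_pos p (1 + (x : Int)) (1 + (y : Int)) (by omega) (by omega) hxy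
      omega
    · exact List.nodup_range
  have := (List.Nodup.subperm hnd hsub).length_le
  simp at this

-- ===== VERDICT (by name: the statement is the Claim_ definition above) =====
theorem generate_id_spec : Claim_equal_generate_id := by
  intro p ids _ hpre
  unfold Spec_generate_id generate_id generate_id_alt
  have hne : ¬ ((p == "") = true) := fun hb => hpre (by simpa using hb)
  rw [if_neg hne, if_neg hne]
  -- A side
  obtain ⟨j0, hj0, hj0free⟩ := exists_free p ids
  obtain ⟨mA, heqA, hA1, hA2, hA3⟩ := loopA_spec p ids (ids.length + 1) 1 ⟨j0, by omega, hj0free⟩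
  have hAle : mA ≤ 1 + (j0 : Int) := by
    by_contra hgt
    exact hj0free (hA3 _ (by omega) (by omega))
  -- B side
  set takenSet : PySem.Set Int := ids.foldl
      (fun u s => if PySem.Str.startswith s p
            && (((PySem.List.pyRange 1 ((ids.length : Int) + 2) 1).foldl
              (fun d i => d.insert (PySem.Int.toStr i) i) PySem.Dict.empty).contains
                (PySem.Str.slice s (some (PySem.Str.len p)) none))
          then PySem.Set.add u ((((PySem.List.pyRange 1 ((ids.length : Int) + 2) 1).foldl
            (fun d i => d.insert (PySem.Int.toStr i) i) PySem.Dict.empty).get?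
              (PySem.Str.slice s (some (PySem.Str.len p)) none)).getD 0)
          else u)
      PySem.Set.empty with htaken
  have hnd : takenSet.Nodup := nodup_condAdd_fold _ _ ids PySem.Set.empty List.nodup_nil
  have hpw : (PySem.List.sorted takenSet (fun x => x)).Pairwise (· < ·) := by
    have hle := PySem.List.sorted_pairwise takenSet (fun x => x)
    have hnd' : (PySem.List.sorted takenSet (fun x => x)).Nodup :=
      ((PySem.List.sorted_perm takenSet (fun x => x) false).nodup_iff).mpr hnd
    exact (hle.and hnd').imp (fun h => lt_of_le_of_ne h.1 h.2)
  obtain ⟨hB1, hB2, hB3⟩ := gapScan_spec _ hpw 1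
  set r := gapScan (PySem.List.sorted takenSet (fun x => x)) 1 with hr
  have hmemts : ∀ x : Int, x ∈ PySem.List.sorted takenSet (fun x => x) ↔
      (1 ≤ x ∧ x < (ids.length : Int) + 2 ∧ (p ++ PySem.Int.toStr x) ∈ ids) := by
    intro x
    rw [PySem.List.mem_sorted, htaken, mem_taken]
  -- the two results coincide
  have hmAbound : mA < (ids.length : Int) + 2 := by omega
  have h1 : mA ≤ r := by
    by_contra hgt
    have hrmem : (p ++ PySem.Int.toStr r) ∈ ids := hA3 r hB1 (by omega)
    exact hB2 ((hmemts r).mpr ⟨hB1, by omega, hrmem⟩)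
  have h2 : r ≤ mA := by
    by_contra hgt
    have : mA ∈ PySem.List.sorted takenSet (fun x => x) := hB3 mA hA1 (by omega)
    exact hA2 ((hmemts mA).mp this).2.2
  rw [heqA]
  have : mA = r := by omega
  rw [this]
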